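-- pv_equiv track=rewrite | github.com/youngminss/Codingtest | Programmers/더 맵게.py | solution
-- ===== SOURCE A (Python) =====
-- import heapq
--
-- def solution(scoville, K):
--     answer = 0
--     heapq.heapify(scoville)
--
--     while len(scoville) > 1 and scoville[0] < K :
--         no1_map = heapq.heappop(scoville)
--         no2_map = heapq.heappop(scoville)
--         new_map = (no1_map + no2_map * 2)
--         heapq.heappush(scoville,new_map)
--         answer += 1
--
--
--     return answer if scoville[0] >= K else -1
-- ===== SOURCE B (Python) =====
-- def solution(scoville, K):
--     # Two-pool scheme: the pre-sorted originals are consumed by an advancing pointer,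
--     # created mixes go into a separate unordered bag scanned for its minimum.
--     # Return value only: A heapifies its argument in place, B leaves it untouched.
--     base = sorted(scoville)
--     i = 0
--     mixes = []
--     answer = 0
--
--     def cur_min():
--         if i == len(base):
--             return min(mixes) if mixes else base[i]
--         if not mixes:
--             return base[i]
--         return min(base[i], min(mixes))
--
--     def pop_min():
--         nonlocal i
--         m = cur_min()
--         if i < len(base) and base[i] == m:
--             i += 1
--         else:
--             mixes.remove(m)
--         return m
--
--     while (len(base) - i) + len(mixes) > 1 and cur_min() < K:
--         a = pop_min()
--         b = pop_min()
--         mixes.append(a + 2 * b)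
--         answer += 1
--     return answer if cur_min() >= K else -1
-- ===== Notes on version B (the rewrite author's own statement) =====
-- stated objective: alternative
-- what changed: B keeps no unified ordered container at all: it sorts the originals once into a static array consumed by an advancing pointer, and puts created mixes into a separate unordered bag whose minimum is found by a linear scan; A instead maintains one mutable binary heap of everything.
import Mathlib
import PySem

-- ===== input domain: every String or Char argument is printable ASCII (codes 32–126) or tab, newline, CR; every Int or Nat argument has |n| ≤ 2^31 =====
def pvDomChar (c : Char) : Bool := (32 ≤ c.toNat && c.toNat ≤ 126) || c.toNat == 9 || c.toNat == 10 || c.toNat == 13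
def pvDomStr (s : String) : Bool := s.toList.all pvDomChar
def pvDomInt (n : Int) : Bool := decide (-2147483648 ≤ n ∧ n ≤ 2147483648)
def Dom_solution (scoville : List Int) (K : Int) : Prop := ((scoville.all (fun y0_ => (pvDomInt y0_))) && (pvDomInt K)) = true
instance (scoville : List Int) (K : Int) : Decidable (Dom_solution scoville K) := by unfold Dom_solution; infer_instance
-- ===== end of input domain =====

-- B drops the heap: a static sorted array consumed by a pointer plus an unordered bag of created
-- mixes scanned for its minimum.  A heapifies its argument in place (a side effect), B leaves it
-- untouched — the equivalence proved here is about the RETURN value only.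

-- ===== PORT A =====
-- heapq's binary min-heap is ported as a mergeable min-heap (skew-heap merge): heapify = fold of push,
-- heappop = take the root and merge its children, heappush = merge with a singleton.  Exact for the
-- RETURN value of A: each heappop yields the minimum element, which is all A's result depends on.
inductive PHeap where
  | leaf : PHeap
  | node : Int → PHeap → PHeap → PHeap

def PHeap.size : PHeap → Nat
  | .leaf => 0
  | .node _ l r => l.size + r.size + 1

-- skew-heap merge, structurally recursive on a fuel bounded by the total size
-- (the 0-fuel clause is unreachable whenever size a + size b ≤ fuel)
def PHeap.mergeF : Nat → PHeap → PHeap → PHeap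
  | _, .leaf, h => h
  | _, .node x l r, .leaf => .node x l r
  | 0, .node x l r, .node _ _ _ => .node x l r
  | fuel + 1, .node x l r, .node y l' r' =>
    if x ≤ y then .node x (PHeap.mergeF fuel r (.node y l' r')) l
    else .node y (PHeap.mergeF fuel r' (.node x l r)) l'

def PHeap.merge (a b : PHeap) : PHeap := PHeap.mergeF (a.size + b.size) a b

def PHeap.push (h : PHeap) (v : Int) : PHeap := PHeap.merge (.node v .leaf .leaf) h

-- the while loop of A: state = (heap, answer); guard 'len(scoville) > 1 and scoville[0] < K'.
-- fuel is only a structural totality guard: the heap shrinks by one element per iteration,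
-- so fuel = initial number of elements always suffices.
def solLoopA (K : Int) : Nat → PHeap → Int → Int
  | 0, _, _ => -1
  | _ + 1, .leaf, _ => -1   -- scoville[0] on an empty list raises in Python; excluded by Pre_
  | fuel + 1, .node x l r, answer =>
    if 1 < (PHeap.node x l r).size ∧ x < K then
      match l.merge r with
      | .leaf => -1   -- unreachable: the heap has ≥ 2 elements here
      | .node y l' r' => solLoopA K fuel ((l'.merge r').push (x + y * 2)) (answer + 1)
    else if x ≥ K then answer else -1

def solution (scoville : List Int) (K : Int) : Int :=
  solLoopA K scoville.length (scoville.foldl PHeap.push .leaf) 0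

-- ===== PORT B =====
-- cur_min(): min of base[i] (if any) and min(mixes) (if any); on the doubly-empty state Python
-- raises IndexError (base[i] on empty base) — that state is excluded by Pre_ (0 is a placeholder).
def curMinB (base : List Int) (i : Nat) (mixes : List Int) : Int :=
  if i = base.length then
    match PySem.List.min? mixes (fun x => x) with
    | some m => m
    | none => 0   -- Python raises IndexError here; outside Pre_
  else
    match PySem.List.min? mixes (fun x => x) with
    | some m => min (base.getD i 0) m
    | none => base.getD i 0

-- pop_min(): advance the pointer if the minimum sits at base[i], else remove it from the bag.
def popMinB (base : List Int) (i : Nat) (mixes : List Int) : Int × Nat × List Int :=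
  let m := curMinB base i mixes
  if i < base.length ∧ base.getD i 0 = m then (m, i + 1, mixes)
  else (m, i, ((PySem.List.remove? mixes m).getD mixes))

-- the while loop of B: state = (pointer i, bag mixes, answer); remaining count drops by 1 per
-- iteration, so fuel = initial number of elements always suffices.
def solLoopB (base : List Int) (K : Int) : Nat → Nat → List Int → Int → Int
  | 0, _, _, _ => -1
  | fuel + 1, i, mixes, answer =>
    if 1 < (base.length - i) + mixes.length ∧ curMinB base i mixes < K then
      let p := popMinB base i mixes
      let q := popMinB base p.2.1 p.2.2
      solLoopB base K fuel q.2.1 (q.2.2 ++ [p.1 + 2 * q.1]) (answer + 1)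
    else if curMinB base i mixes ≥ K then answer else -1

def solution_alt (scoville : List Int) (K : Int) : Int :=
  let base := PySem.List.sorted scoville (fun x => x) false
  solLoopB base K base.length 0 [] 0

-- ===== PRECONDITION & SPEC =====
-- Pre_ excludes only the empty list, on which both Pythons raise IndexError (scoville[0] / base[0]).
def Pre_solution (scoville : List Int) (K : Int) : Prop := scoville ≠ []
instance (scoville : List Int) (K : Int) : Decidable (Pre_solution scoville K) := by unfold Pre_solution; infer_instance
def pvWitness_solution : List Int × Int := ([1, 2, 3, 9, 10, 12], 7)

def Spec_solution (scoville : List Int) (K : Int) (out : Int) : Prop := out = solution_alt scoville K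
instance (scoville : List Int) (K : Int) (out : Int) : Decidable (Spec_solution scoville K out) := by unfold Spec_solution; infer_instance

-- ===== CLAIM (what is proved, stated in full; the proofs are below) =====
def Claim_equal_solution : Prop := ∀ (scoville : List Int) (K : Int), Dom_solution scoville K → Pre_solution scoville K → Spec_solution scoville K (solution scoville K)

-- ===== LEMMAS AND PROOFS =====

def PHeap.toList : PHeap → List Int
  | .leaf => []
  | .node x l r => x :: (l.toList ++ r.toList)

def PHeap.IsHeap : PHeap → Prop
  | .leaf => True
  | .node x l r => (∀ y ∈ l.toList, x ≤ y) ∧ (∀ y ∈ r.toList, x ≤ y) ∧ l.IsHeap ∧ r.IsHeap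

theorem PHeap.size_eq_length_toList (h : PHeap) : h.size = h.toList.length := by
  induction h with
  | leaf => rfl
  | node x l r ihl ihr => simp [PHeap.size, PHeap.toList, ihl, ihr]

theorem PHeap.toList_mergeF_perm (fuel : Nat) (a b : PHeap) :
    a.size + b.size ≤ fuel → (PHeap.mergeF fuel a b).toList.Perm (a.toList ++ b.toList) := by
  fun_induction PHeap.mergeF fuel a b with
  | case1 => intro _; simp [PHeap.toList]
  | case2 => intro _; simp [PHeap.toList]
  | case3 =>
    intro hf
    simp [PHeap.size] at hf
  | case4 fuel x l r y l' r' hle ih =>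
    intro hf
    simp only [PHeap.size] at hf
    have ih' := ih (by simp only [PHeap.size]; omega)
    show (PHeap.node x (PHeap.mergeF fuel r (.node y l' r')) l).toList.Perm _
    simp only [PHeap.toList, List.cons_append]
    refine List.Perm.cons x ?_
    refine (ih'.append_right l.toList).trans ?_
    rw [← Multiset.coe_eq_coe]
    simp only [PHeap.toList, ← Multiset.coe_add, ← Multiset.cons_coe, ← Multiset.singleton_add]
    abel
  | case5 fuel x l r y l' r' hle ih =>
    intro hf
    simp only [PHeap.size] at hf
    have ih' := ih (by simp only [PHeap.size]; omega)
    show (PHeap.node y (PHeap.mergeF fuel r' (.node x l r)) l').toList.Perm _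
    simp only [PHeap.toList, List.cons_append]
    refine List.Perm.trans (List.Perm.cons y ((ih'.append_right l'.toList))) ?_
    rw [← Multiset.coe_eq_coe]
    simp only [PHeap.toList, ← Multiset.coe_add, ← Multiset.cons_coe,
      ← Multiset.singleton_add]
    abel

theorem PHeap.toList_merge_perm (a b : PHeap) : (a.merge b).toList.Perm (a.toList ++ b.toList) :=
  PHeap.toList_mergeF_perm (a.size + b.size) a b (le_refl _)

theorem PHeap.isHeap_mergeF (fuel : Nat) (a b : PHeap) :
    a.size + b.size ≤ fuel → a.IsHeap → b.IsHeap → (PHeap.mergeF fuel a b).IsHeap := by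
  fun_induction PHeap.mergeF fuel a b with
  | case1 => intro _ _ hb; exact hb
  | case2 => intro _ ha _; exact ha
  | case3 =>
    intro hf _ _
    simp [PHeap.size] at hf
  | case4 fuel x l r y l' r' hle ih =>
    intro hf ha hb
    simp only [PHeap.size] at hf
    obtain ⟨hl, hr, hhl, hhr⟩ := ha
    refine ⟨?_, hl, ih (by simp only [PHeap.size]; omega) hhr hb, hhl⟩
    intro z hz
    have hz' := (PHeap.toList_mergeF_perm fuel r (.node y l' r')
      (by simp only [PHeap.size]; omega)).mem_iff.mp hz
    rcases List.mem_append.mp hz' with h | h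
    · exact hr z h
    · simp only [PHeap.toList, List.mem_cons, List.mem_append] at h
      obtain ⟨h1, h2, _, _⟩ := hb
      rcases h with h | h | h
      · omega
      · have := h1 z h; omega
      · have := h2 z h; omega
  | case5 fuel x l r y l' r' hle ih =>
    intro hf ha hb
    simp only [PHeap.size] at hf
    obtain ⟨h1, h2, hhl', hhr'⟩ := hb
    refine ⟨?_, h1, ih (by simp only [PHeap.size]; omega) hhr' ha, hhl'⟩
    intro z hz
    have hz' := (PHeap.toList_mergeF_perm fuel r' (.node x l r)
      (by simp only [PHeap.size]; omega)).mem_iff.mp hz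
    rcases List.mem_append.mp hz' with h | h
    · exact h2 z h
    · simp only [PHeap.toList, List.mem_cons, List.mem_append] at h
      obtain ⟨hl, hr, _, _⟩ := ha
      rcases h with h | h | h
      · omega
      · have := hl z h; omega
      · have := hr z h; omega

theorem PHeap.isHeap_merge (a b : PHeap) (ha : a.IsHeap) (hb : b.IsHeap) : (a.merge b).IsHeap :=
  PHeap.isHeap_mergeF (a.size + b.size) a b (le_refl _) ha hb

theorem PHeap.toList_push_perm (h : PHeap) (v : Int) : (h.push v).toList.Perm (v :: h.toList) := by
  simpa [PHeap.toList] using PHeap.toList_merge_perm (.node v .leaf .leaf) h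

theorem PHeap.isHeap_push (h : PHeap) (v : Int) (hh : h.IsHeap) : (h.push v).IsHeap := by
  apply PHeap.isHeap_merge
  · exact ⟨by simp [PHeap.toList], by simp [PHeap.toList], trivial, trivial⟩
  · exact hh

theorem PHeap.foldl_push_perm (xs : List Int) (h : PHeap) :
    (xs.foldl PHeap.push h).toList.Perm (h.toList ++ xs) := by
  induction xs generalizing h with
  | nil => simp
  | cons x xs ih =>
    refine (ih (h.push x)).trans ?_
    refine ((PHeap.toList_push_perm h x).append_right xs).trans ?_
    rw [← Multiset.coe_eq_coe]
    simp only [List.cons_append, ← Multiset.coe_add, ← Multiset.cons_coe, ← Multiset.singleton_add]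
    abel

theorem PHeap.foldl_push_isHeap (xs : List Int) (h : PHeap) (hh : h.IsHeap) :
    (xs.foldl PHeap.push h).IsHeap := by
  induction xs generalizing h with
  | nil => exact hh
  | cons x xs ih => exact ih (h.push x) (PHeap.isHeap_push h x hh)

theorem PHeap.root_min (x : Int) (l r : PHeap) (hh : (PHeap.node x l r).IsHeap) :
    ∀ y ∈ (PHeap.node x l r).toList, x ≤ y := by
  obtain ⟨h1, h2, _, _⟩ := hh
  intro y hy
  simp only [PHeap.toList, List.mem_cons, List.mem_append] at hy
  rcases hy with h | h | h
  · omega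
  · exact h1 y h
  · exact h2 y h

-- the head of the remaining suffix of the sorted base is its minimum
theorem drop_head_min (base : List Int) (i : Nat)
    (hs : base.Pairwise (· ≤ ·)) (hlt : i < base.length) :
    base.getD i 0 ∈ base.drop i ∧ ∀ y ∈ base.drop i, base.getD i 0 ≤ y := by
  have hgd : base.getD i 0 = base[i] := by
    simp [List.getD_eq_getElem?_getD, List.getElem?_eq_getElem hlt]
  have hd : base.drop i = base[i] :: base.drop (i + 1) := List.drop_eq_getElem_cons hlt
  have hpw : (base.drop i).Pairwise (· ≤ ·) := hs.sublist (List.drop_sublist i base)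
  rw [hgd, hd]
  rw [hd] at hpw
  refine ⟨List.mem_cons_self, ?_⟩
  intro y hy
  rcases List.mem_cons.mp hy with rfl | hy
  · exact le_refl _
  · exact (List.pairwise_cons.mp hpw).1 y hy

-- curMinB is a member of, and a lower bound of, the remaining multiset (nonempty case)
theorem curMinB_spec (base : List Int) (i : Nat) (mixes : List Int)
    (hs : base.Pairwise (· ≤ ·)) (hi : i ≤ base.length)
    (hne : base.drop i ++ mixes ≠ []) :
    curMinB base i mixes ∈ base.drop i ++ mixes ∧
    ∀ y ∈ base.drop i ++ mixes, curMinB base i mixes ≤ y := by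
  unfold curMinB
  by_cases hieq : i = base.length
  · have hdnil : base.drop i = [] := by subst hieq; exact List.drop_length
    rw [hdnil] at hne ⊢
    simp only [List.nil_append] at hne ⊢
    rw [if_pos hieq]
    rcases hm : PySem.List.min? mixes (fun x => x) with _ | m
    · exact absurd (by rwa [PySem.List.min?_eq_none_iff] at hm) hne
    · show m ∈ mixes ∧ ∀ y ∈ mixes, m ≤ y
      refine ⟨PySem.List.min?_mem hm, ?_⟩
      intro y hy
      simpa using PySem.List.min?_isMin hm y hy
  · have hlt : i < base.length := lt_of_le_of_ne hi hieq
    obtain ⟨hhm, hhb⟩ := drop_head_min base i hs hlt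
    rw [if_neg hieq]
    rcases hm : PySem.List.min? mixes (fun x => x) with _ | m
    · show base.getD i 0 ∈ base.drop i ++ mixes ∧ ∀ y ∈ base.drop i ++ mixes, base.getD i 0 ≤ y
      have hmnil : mixes = [] := by rwa [PySem.List.min?_eq_none_iff] at hm
      subst hmnil
      simp only [List.append_nil]
      exact ⟨hhm, hhb⟩
    · show min (base.getD i 0) m ∈ base.drop i ++ mixes ∧
        ∀ y ∈ base.drop i ++ mixes, min (base.getD i 0) m ≤ y
      have hmm : m ∈ mixes := PySem.List.min?_mem hm
      have hmb : ∀ y ∈ mixes, m ≤ y := by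
        intro y hy; simpa using PySem.List.min?_isMin hm y hy
      constructor
      · rcases le_total (base.getD i 0) m with hc | hc
        · rw [min_eq_left hc]; exact List.mem_append_left _ hhm
        · rw [min_eq_right hc]; exact List.mem_append_right _ hmm
      · intro y hy
        rcases List.mem_append.mp hy with hy | hy
        · exact le_trans (min_le_left _ _) (hhb y hy)
        · exact le_trans (min_le_right _ _) (hmb y hy)

-- popMinB removes exactly one occurrence of the minimum
theorem popMinB_spec (base : List Int) (i : Nat) (mixes : List Int)
    (hs : base.Pairwise (· ≤ ·)) (hi : i ≤ base.length)
    (hne : base.drop i ++ mixes ≠ []) :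
    (popMinB base i mixes).1 = curMinB base i mixes ∧
    (base.drop i ++ mixes).Perm
      ((popMinB base i mixes).1 ::
        (base.drop (popMinB base i mixes).2.1 ++ (popMinB base i mixes).2.2)) ∧
    (popMinB base i mixes).2.1 ≤ base.length := by
  obtain ⟨hmem, hmin⟩ := curMinB_spec base i mixes hs hi hne
  unfold popMinB
  by_cases hc : i < base.length ∧ base.getD i 0 = curMinB base i mixes
  · rw [if_pos hc]
    obtain ⟨hlt, hgd⟩ := hc
    refine ⟨rfl, ?_, hlt⟩
    have hd : base.drop i = base[i] :: base.drop (i + 1) := List.drop_eq_getElem_cons hlt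
    have hgd' : base.getD i 0 = base[i] := by
      simp [List.getD_eq_getElem?_getD, List.getElem?_eq_getElem hlt]
    rw [hd, List.cons_append, ← hgd', hgd]
  · rw [if_neg hc]
    -- the minimum is not at base[i], so it lies in the bag
    have hmix : curMinB base i mixes ∈ mixes := by
      rcases List.mem_append.mp hmem with hmb | hmb
      · exfalso
        by_cases hlt : i < base.length
        · obtain ⟨hhm, hhb⟩ := drop_head_min base i hs hlt
          have h1 : base.getD i 0 ≤ curMinB base i mixes := hhb _ hmb
          have h2 : curMinB base i mixes ≤ base.getD i 0 :=
            hmin _ (List.mem_append_left _ hhm)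
          exact hc ⟨hlt, le_antisymm h1 h2⟩
        · have : base.drop i = [] := by
            apply List.drop_eq_nil_of_le; omega
          rw [this] at hmb; simp at hmb
      · exact hmb
    rw [PySem.List.remove?_eq_some_erase mixes _ hmix]
    refine ⟨rfl, ?_, hi⟩
    simp only [Option.getD_some]
    refine List.Perm.trans ((List.perm_cons_erase hmix).append_left (base.drop i)) ?_
    exact List.perm_middle

-- the heap root equals curMinB when the contents agree as multisets
theorem root_eq_curMinB (x : Int) (l r : PHeap) (base : List Int) (i : Nat) (mixes : List Int)
    (hh : (PHeap.node x l r).IsHeap)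
    (hp : (PHeap.node x l r).toList.Perm (base.drop i ++ mixes))
    (hs : base.Pairwise (· ≤ ·)) (hi : i ≤ base.length) :
    x = curMinB base i mixes := by
  have hne : base.drop i ++ mixes ≠ [] := by
    intro hnil
    rw [hnil] at hp
    simp [PHeap.toList] at hp
  obtain ⟨hmem, hmin⟩ := curMinB_spec base i mixes hs hi hne
  have h1 : x ≤ curMinB base i mixes :=
    PHeap.root_min x l r hh _ (hp.symm.mem_iff.mp hmem)
  have h2 : curMinB base i mixes ≤ x :=
    hmin _ (hp.mem_iff.mp (by simp [PHeap.toList]))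
  omega

theorem loop_eq (base : List Int) (K : Int) (fuel : Nat) (h : PHeap) (i : Nat)
    (mixes : List Int) (answer : Int)
    (hh : h.IsHeap) (hp : h.toList.Perm (base.drop i ++ mixes))
    (hs : base.Pairwise (· ≤ ·)) (hi : i ≤ base.length)
    (hne : base.drop i ++ mixes ≠ []) :
    solLoopA K fuel h answer = solLoopB base K fuel i mixes answer := by
  induction fuel generalizing h i mixes answer with
  | zero => simp [solLoopA, solLoopB]
  | succ fuel ih =>
    cases h with
    | leaf =>
      exfalso
      exact hne hp.symm.eq_nil
    | node x l r =>
      have hx : x = curMinB base i mixes := root_eq_curMinB x l r base i mixes hh hp hs hi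
      subst hx
      set c := curMinB base i mixes with hc
      have hsz : (PHeap.node c l r).size = (base.length - i) + mixes.length := by
        rw [PHeap.size_eq_length_toList, hp.length_eq]
        simp
      rw [solLoopA, solLoopB, hsz]
      by_cases hg : 1 < (base.length - i) + mixes.length ∧ c < K
      · rw [if_pos hg, if_pos hg]
        obtain ⟨hp1eq, hp1perm, hp1le⟩ := popMinB_spec base i mixes hs hi hne
        set p1 := popMinB base i mixes with hp1d
        rw [hp1eq] at hp1perm
        have hmergeperm : (l.merge r).toList.Perm (base.drop p1.2.1 ++ p1.2.2) := by
          apply List.Perm.cons_inv (a := c)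
          exact ((PHeap.toList_merge_perm l r).cons c).trans (hp.trans hp1perm)
        have hmheap : (l.merge r).IsHeap := PHeap.isHeap_merge l r hh.2.2.1 hh.2.2.2
        have hlen1 : (base.drop p1.2.1 ++ p1.2.2).length
            = (base.length - i) + mixes.length - 1 := by
          have h1 := hp1perm.length_eq
          simp only [List.length_cons, List.length_append, List.length_drop] at h1 ⊢
          omega
        have hne1 : base.drop p1.2.1 ++ p1.2.2 ≠ [] := by
          intro hnil
          rw [hnil] at hlen1
          simp at hlen1
          omega
        match hmg : l.merge r with
        | .leaf =>
          exfalso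
          rw [hmg] at hmergeperm
          exact hne1 hmergeperm.symm.eq_nil
        | .node y l' r' =>
          rw [hmg] at hmergeperm hmheap
          have hy : y = curMinB base p1.2.1 p1.2.2 :=
            root_eq_curMinB y l' r' _ _ _ hmheap hmergeperm hs hp1le
          subst hy
          set d := curMinB base p1.2.1 p1.2.2 with hd
          obtain ⟨hp2eq, hp2perm, hp2le⟩ := popMinB_spec base p1.2.1 p1.2.2 hs hp1le hne1
          set p2 := popMinB base p1.2.1 p1.2.2 with hp2d
          rw [hp2eq] at hp2perm
          have hrestperm : (l'.merge r').toList.Perm (base.drop p2.2.1 ++ p2.2.2) := by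
            apply List.Perm.cons_inv (a := d)
            exact ((PHeap.toList_merge_perm l' r').cons d).trans (hmergeperm.trans hp2perm)
          have hpushperm : ((l'.merge r').push (c + d * 2)).toList.Perm
              (base.drop p2.2.1 ++ (p2.2.2 ++ [c + d * 2])) := by
            refine (PHeap.toList_push_perm _ _).trans ?_
            refine List.Perm.trans (hrestperm.cons _) ?_
            rw [← List.append_assoc]
            exact (List.perm_append_singleton _ _).symm
          have hpushheap : ((l'.merge r').push (c + d * 2)).IsHeap :=
            PHeap.isHeap_push _ _ (PHeap.isHeap_merge l' r' hmheap.2.2.1 hmheap.2.2.2)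
          have hne2 : base.drop p2.2.1 ++ (p2.2.2 ++ [c + d * 2]) ≠ [] := by
            intro hnil
            have h0 : (base.drop p2.2.1 ++ (p2.2.2 ++ [c + d * 2])).length = 0 := by
              rw [hnil]; rfl
            simp at h0
          have hval : p1.1 + 2 * p2.1 = c + d * 2 := by
            rw [hp1eq, hp2eq]; ring
          show solLoopA K fuel ((l'.merge r').push (c + d * 2)) (answer + 1)
              = solLoopB base K fuel p2.2.1 (p2.2.2 ++ [p1.1 + 2 * p2.1]) (answer + 1)
          rw [hval]
          exact ih _ _ _ _ hpushheap hpushperm hp2le hne2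
      · rw [if_neg hg, if_neg hg]

-- ===== VERDICT (by name: the statement is the Claim_ definition above) =====
theorem solution_spec : Claim_equal_solution := by
  intro scoville K _ hpre
  unfold Spec_solution solution solution_alt
  have hperm : (scoville.foldl PHeap.push .leaf).toList.Perm
      ((PySem.List.sorted scoville (fun x => x) false).drop 0 ++ []) := by
    simp only [List.drop_zero, List.append_nil]
    refine (PHeap.foldl_push_perm scoville .leaf).trans ?_
    simpa [PHeap.toList] using (PySem.List.sorted_perm scoville (fun x => x) false).symm
  have hlen : (PySem.List.sorted scoville (fun x => x) false).length = scoville.length :=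
    (PySem.List.sorted_perm scoville (fun x => x) false).length_eq
  rw [← hlen]
  refine loop_eq _ K _ _ 0 [] 0 (PHeap.foldl_push_isHeap scoville .leaf trivial) hperm
    (by simpa using PySem.List.sorted_pairwise scoville (fun x => x)) (Nat.zero_le _) ?_
  simp only [List.drop_zero, List.append_nil]
  rw [Ne, PySem.List.sorted_eq_nil_iff]
  exact hpre
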